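-- pv_equiv track=rewrite | github.com/CaptainLullaby/Frozen-Lake-Environemnt-with-Deep-Learning-Techniques | _init_/Check.py | check_char
-- ===== SOURCE A (Python) =====
-- def check_char(lake, char):
--     lst = []
--     for i, state in enumerate(lake):
--         temp = []
--         for j, c in enumerate(lake):
--             if c == char:
--                 temp.append(1)
--             else:
--                 temp.append(0)
--
--         lst.append(temp)
--
--     return lst
-- ===== SOURCE B (Python) =====
-- def check_char(lake, char):
--     n = len(lake)
--     matrix = [[0] * n for _ in range(n)]
--     for j, c in enumerate(lake):
--         if c == char:
--             for row in matrix: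
--                 row[j] = 1
--     return matrix
-- ===== Notes on version B (the rewrite author's own statement) =====
-- stated objective: alternative
-- what changed: B allocates an all-zero n×n matrix and then scatters 1s column-wise: one pass over lake finds the matching positions and writes a 1 into that column of every row, replacing A's per-cell equality comparison in a nested n×n loop.
import Mathlib
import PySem

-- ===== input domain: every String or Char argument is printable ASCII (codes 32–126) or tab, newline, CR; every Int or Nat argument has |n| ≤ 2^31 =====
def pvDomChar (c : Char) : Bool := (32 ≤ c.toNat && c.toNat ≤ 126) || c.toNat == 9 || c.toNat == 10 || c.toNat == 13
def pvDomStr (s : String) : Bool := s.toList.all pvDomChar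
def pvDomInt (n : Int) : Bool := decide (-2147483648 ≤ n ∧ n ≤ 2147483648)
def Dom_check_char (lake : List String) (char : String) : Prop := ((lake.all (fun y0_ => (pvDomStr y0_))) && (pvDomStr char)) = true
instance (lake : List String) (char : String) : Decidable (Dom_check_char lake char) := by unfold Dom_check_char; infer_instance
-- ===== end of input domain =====

-- B allocates an all-zero n×n matrix and scatters 1s column-wise at matching positions (alternative decomposition); A compares every pair.
-- ===== PORT A =====
-- literal transliteration of A: outer loop appends, inner loop appends 1/0 per comparison
def check_char (lake : List String) (char : String) : List (List Int) :=
  lake.foldl (fun lst _state =>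
    lst ++ [lake.foldl (fun temp c => temp ++ (if c == char then [1] else [0])) []]) []

-- ===== PORT B =====
-- B: zero matrix, then for each matching position j write a 1 into column j of every row
def check_char_alt (lake : List String) (char : String) : List (List Int) :=
  let n := lake.length
  let matrix := List.replicate n (List.replicate n (0 : Int))
  (PySem.List.enumerate lake).foldl
    (fun m p => if p.2 == char then m.map (fun row => row.set p.1.toNat 1) else m) matrix

-- ===== PRECONDITION & SPEC =====
def Spec_check_char (lake : List String) (char : String) (out : List (List Int)) : Prop := out = check_char_alt lake char
instance (lake : List String) (char : String) (out : List (List Int)) : Decidable (Spec_check_char lake char out) := by unfold Spec_check_char; infer_instance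

-- ===== CLAIM (what is proved, stated in full; the proofs are below) =====
def Claim_equal_check_char : Prop := ∀ (lake : List String) (char : String), Dom_check_char lake char → Spec_check_char lake char (check_char lake char)

-- ===== LEMMAS AND PROOFS =====

-- A's inner loop builds the indicator row
theorem inner_fold (char : String) :
    ∀ (l : List String) (acc : List Int),
      l.foldl (fun temp c => temp ++ (if c == char then [1] else [0])) acc =
      acc ++ l.map (fun c => if c == char then (1 : Int) else 0) := by
  intro l
  induction l with
  | nil => simp
  | cons h t ih => intro acc; rw [List.foldl_cons, ih]; by_cases hc : h = char <;> simp [hc]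

-- A's outer loop replicates the row
theorem outer_fold (row : List Int) :
    ∀ (l : List String) (acc : List (List Int)),
      l.foldl (fun lst _ => lst ++ [row]) acc = acc ++ l.map (fun _ => row) := by
  intro l
  induction l with
  | nil => simp
  | cons h t ih => intro acc; rw [List.foldl_cons, ih]; simp

-- B's fold maps every row identically, so it preserves the replicate shape
theorem repl_fold (char : String) :
    ∀ (ps : List (Int × String)) (n : Nat) (r : List Int),
      ps.foldl (fun m p => if p.2 == char then m.map (fun row => row.set p.1.toNat 1) else m)
        (List.replicate n r)
      = List.replicate n
          (ps.foldl (fun r p => if p.2 == char then r.set p.1.toNat 1 else r) r) := by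
  intro ps
  induction ps with
  | nil => intro n r; rfl
  | cons p t ih =>
    intro n r
    rw [List.foldl_cons, List.foldl_cons]
    by_cases hc : p.2 = char
    · rw [if_pos (show (p.2 == char) = true by simp [hc]), List.map_replicate, ih]; simp [hc]
    · rw [if_neg (show ¬ (p.2 == char) = true by simp [hc]), ih]; simp [hc]

-- scattering into the zero row at the matching positions yields the indicator row
theorem row_fold (char : String) :
    ∀ (xs : List String) (pre : List Int),
      (PySem.List.enumerate xs (pre.length : Int)).foldl
          (fun r p => if p.2 == char then r.set p.1.toNat 1 else r)
          (pre ++ List.replicate xs.length 0)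
      = pre ++ xs.map (fun c => if c == char then (1 : Int) else 0) := by
  intro xs
  induction xs with
  | nil => intro pre; simp [PySem.List.enumerate_nil]
  | cons x t ih =>
    intro pre
    rw [PySem.List.enumerate_cons, List.foldl_cons]
    by_cases hc : x = char
    · have h1 : ((pre.length : Int) + 1) = ((pre ++ [(1 : Int)]).length : Int) := by
        simp
      have hset : (pre ++ List.replicate (x :: t).length (0 : Int)).set
          ((pre.length : Int)).toNat 1 = (pre ++ [(1 : Int)]) ++ List.replicate t.length 0 := by
        simp [List.replicate_succ, List.set_append_right _ _ (le_refl pre.length)]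
      rw [if_pos (show ((((pre.length : Int)), x).2 == char) = true by simp [hc]), hset, h1,
        ih (pre ++ [(1 : Int)])]
      simp [hc]
    · have h1 : ((pre.length : Int) + 1) = ((pre ++ [(0 : Int)]).length : Int) := by
        simp
      have hacc : pre ++ List.replicate (x :: t).length (0 : Int)
          = (pre ++ [(0 : Int)]) ++ List.replicate t.length 0 := by
        simp [List.replicate_succ]
      rw [if_neg (show ¬ ((((pre.length : Int)), x).2 == char) = true by simp [hc]), hacc, h1,
        ih (pre ++ [(0 : Int)])]
      simp [hc]

-- ===== VERDICT (by name: the statement is the Claim_ definition above) =====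
theorem check_char_spec : Claim_equal_check_char := by
  intro lake char _
  unfold Spec_check_char check_char check_char_alt
  have inner := inner_fold char lake []
  have hrow := row_fold char lake ([] : List Int)
  simp only [List.nil_append, List.length_nil, Nat.cast_zero] at hrow
  calc lake.foldl (fun lst _ =>
        lst ++ [lake.foldl (fun temp c => temp ++ (if c == char then [1] else [0])) []]) []
      = lake.foldl (fun lst _ =>
        lst ++ [lake.map (fun c => if c == char then (1 : Int) else 0)]) [] := by
        simp only [inner, List.nil_append]
    _ = lake.map (fun _ => lake.map (fun c => if c == char then (1 : Int) else 0)) := by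
        simp [outer_fold _ lake []]
    _ = List.replicate lake.length (lake.map (fun c => if c == char then (1 : Int) else 0)) := by
        simp [List.map_const']
    _ = _ := by
        rw [repl_fold char (PySem.List.enumerate lake) lake.length
            (List.replicate lake.length 0), hrow]
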